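-- pv_equiv track=rewrite | github.com/chadapopp/Algos | fundamentals_to_do_3.py | previous_lengths
-- ===== SOURCE A (Python) =====
-- def previous_lengths(array):
--     if len(array) == 0:
--         return "There is no information."
--     n = len(array)
--     prev_length = len(array[n-1])
--     for i in range(n):
--         curr_length = len(array[i])
--         array[i] = prev_length
--         prev_length = curr_length
--     return array
-- ===== SOURCE B (Python) =====
-- def previous_lengths(array):
--     if len(array) == 0:
--         return "There is no information."
--     lengths = [len(x) for x in array]
--     for i in range(len(array)):
--         array[i] = lengths[i - 1]
--     return array
-- ===== Notes on version B (the rewrite author's own statement) =====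
-- stated objective: alternative
-- what changed: B precomputes the full table of element lengths and assigns array[i] = lengths[i-1] using Python's negative indexing for the circular wrap, instead of A's rolling prev/curr scalar carried through the loop.
-- outside the precondition, e.g. on previous_lengths([]): A returns 'There is no information.', B returns 'There is no information.'
import Mathlib
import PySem

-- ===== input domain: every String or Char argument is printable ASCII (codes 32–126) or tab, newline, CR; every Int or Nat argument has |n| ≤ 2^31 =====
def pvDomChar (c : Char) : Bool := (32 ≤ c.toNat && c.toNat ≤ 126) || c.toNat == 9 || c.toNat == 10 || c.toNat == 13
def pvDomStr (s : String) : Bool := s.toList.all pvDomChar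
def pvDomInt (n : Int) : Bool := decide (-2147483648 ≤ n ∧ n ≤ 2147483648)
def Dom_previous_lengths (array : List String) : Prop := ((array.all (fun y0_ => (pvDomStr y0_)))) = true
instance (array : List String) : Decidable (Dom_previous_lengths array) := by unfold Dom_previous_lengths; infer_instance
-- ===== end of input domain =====

-- B replaces A's rolling prev/curr scalar with a precomputed length table indexed
-- circularly (lengths[i-1], negative wrap at i = 0); same O(n) cost (objective: alternative).
-- A mutates its argument list in place; the equivalence proved here is about the return value.

-- ===== PORT A =====
-- the for-loop of A carrying prev_length through the list
def pvLoopA : List String → Int → List Int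
  | [], _ => []
  | x :: xs, prev => prev :: pvLoopA xs (PySem.Str.len x)

def previous_lengths (array : List String) : List Int :=
  if array.length = 0 then [] else   -- Python returns the sentinel string here; outside Pre_
    let n := array.length
    let prev := PySem.Str.len (PySem.List.pyGetD array ((n : Int) - 1) "")
    pvLoopA array prev

-- ===== PORT B =====
def previous_lengths_alt (array : List String) : List Int :=
  if array.length = 0 then [] else   -- Python returns the sentinel string here; outside Pre_
    let lengths : List Int := array.map (fun x => PySem.Str.len x)
    (List.range array.length).map (fun (i : Nat) => PySem.List.pyGetD lengths ((i : Int) - 1) 0)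

-- ===== PRECONDITION & SPEC =====
-- Pre_ excludes the empty list, on which A returns the sentinel string
-- "There is no information." — not a value of the declared list-of-int type.
def Pre_previous_lengths (array : List String) : Prop := array ≠ []
instance (array : List String) : Decidable (Pre_previous_lengths array) := by unfold Pre_previous_lengths; infer_instance
def pvWitness_previous_lengths : List String := ["ab", "c"]

def Spec_previous_lengths (array : List String) (out : List Int) : Prop := out = previous_lengths_alt array
instance (array : List String) (out : List Int) : Decidable (Spec_previous_lengths array out) := by unfold Spec_previous_lengths; infer_instance

-- ===== CLAIM (what is proved, stated in full; the proofs are below) =====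
def Claim_equal_previous_lengths : Prop := ∀ (array : List String), Dom_previous_lengths array → Pre_previous_lengths array → Spec_previous_lengths array (previous_lengths array)

-- ===== LEMMAS AND PROOFS =====

-- A's loop: output is prev followed by the lengths of all but the last element
theorem pvLoopA_eq (xs : List String) (prev : Int) (h : xs ≠ []) :
    pvLoopA xs prev = prev :: (xs.map (fun x => PySem.Str.len x)).dropLast := by
  induction xs generalizing prev with
  | nil => exact absurd rfl h
  | cons x xs ih =>
    cases xs with
    | nil => simp [pvLoopA]
    | cons y ys =>
      rw [pvLoopA, ih _ (by simp)]
      simp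

-- B's circularly indexed map over the length table, characterised
theorem pvAltChar (L : List Int) (h : L ≠ []) :
    (List.range L.length).map (fun (i : Nat) => PySem.List.pyGetD L ((i : Int) - 1) 0)
      = L.getLast h :: L.dropLast := by
  apply List.ext_getElem
  · have : L.length ≠ 0 := by simpa using h
    simp
    omega
  · intro j h1 h2
    simp only [List.getElem_map, List.getElem_range]
    cases j with
    | zero =>
      have h0 : ((0 : Nat) : Int) - 1 = -1 := by norm_num
      rw [h0, PySem.List.pyGetD_neg_one L 0 h]
      simp
    | succ m =>
      have hm : m < L.length - 1 := by simp at h2; omega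
      have hcast : ((m + 1 : Nat) : Int) - 1 = (m : Int) := by push_cast; ring
      rw [hcast, PySem.List.pyGetD_natCast]
      have hmL : m < L.length := by omega
      have hmD : m < L.dropLast.length := by simpa using hm
      simp [List.getD, List.getElem?_eq_getElem hmL, List.getElem_dropLast]

theorem previous_lengths_spec : Claim_equal_previous_lengths := by
  intro array _ hpre
  unfold Spec_previous_lengths previous_lengths previous_lengths_alt
  unfold Pre_previous_lengths at hpre
  have hlen : array.length ≠ 0 := by simpa using hpre
  simp only [if_neg hlen]
  set L : List Int := array.map (fun x => PySem.Str.len x) with hL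
  have hLne : L ≠ [] := by simp [hL, hpre]
  have hLlen : L.length = array.length := by simp [hL]
  obtain ⟨k, hk⟩ : ∃ k, array.length = k + 1 := ⟨array.length - 1, by omega⟩
  have hkarr : k < array.length := by omega
  -- A's initial prev_length is the last element's length
  have hprev : PySem.Str.len (PySem.List.pyGetD array ((array.length : Int) - 1) "")
      = L.getLast hLne := by
    have hcast : ((array.length : Int) - 1) = ((k : Nat) : Int) := by rw [hk]; push_cast; ring
    rw [hcast, PySem.List.pyGetD_natCast]
    rw [List.getLast_eq_getElem]
    simp only [hL, List.getElem_map, List.getD, List.getElem?_eq_getElem hkarr, Option.getD_some]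
    simp only [List.length_map]
    congr 1
    simp [show array.length - 1 = k from by omega]
  rw [pvLoopA_eq array _ hpre, hprev, ← hLlen, pvAltChar L hLne]
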